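-- pv_equiv track=rewrite | github.com/andra-maria/ChatCode | word_processing.py | reduce_ids_for_demo
-- ===== SOURCE A (Python) =====
-- def reduce_ids_for_demo(binary_ids, actual_ids, data):
--     length = len(binary_ids)
--     i = 0
--     j = len(binary_ids) - sum(binary_ids)
--     target_no = sum(binary_ids)
--     while i < length and j > target_no:
--         if binary_ids[i] is 0:
--             data.pop(i)
--             actual_ids.pop(i)
--             binary_ids.pop(i)
--             i = i - 1
--             length = length - 1
--             j = j -1
--         i = i + 1
--     return binary_ids, actual_ids, data
-- ===== SOURCE B (Python) =====
-- def reduce_ids_for_demo(binary_ids, actual_ids, data):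
--     # Plan-then-execute, linear planning pass: collect the original positions of
--     # the first (zeros - ones) zero-marked entries, then remove exactly those
--     # positions back-to-front from all three lists (mutating in place, like A).
--     k = len(binary_ids) - 2 * sum(binary_ids)
--     drops = []
--     for j, b in enumerate(binary_ids):
--         if k > 0 and b == 0:
--             drops.append(j)
--             k -= 1
--     for j in reversed(drops):
--         data.pop(j)
--         actual_ids.pop(j)
--         binary_ids.pop(j)
--     return binary_ids, actual_ids, data
-- ===== Notes on version B (the rewrite author's own statement) =====
-- stated objective: alternative
-- what changed: Replaces A's single while loop that pops in place with index rewinding (i = i - 1) and live length/j counters by a plan-then-execute scheme: one linear pass collects the original positions of the first (zeros - ones) zero entries, then those positions are removed back-to-front from all three lists.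
import Mathlib
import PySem

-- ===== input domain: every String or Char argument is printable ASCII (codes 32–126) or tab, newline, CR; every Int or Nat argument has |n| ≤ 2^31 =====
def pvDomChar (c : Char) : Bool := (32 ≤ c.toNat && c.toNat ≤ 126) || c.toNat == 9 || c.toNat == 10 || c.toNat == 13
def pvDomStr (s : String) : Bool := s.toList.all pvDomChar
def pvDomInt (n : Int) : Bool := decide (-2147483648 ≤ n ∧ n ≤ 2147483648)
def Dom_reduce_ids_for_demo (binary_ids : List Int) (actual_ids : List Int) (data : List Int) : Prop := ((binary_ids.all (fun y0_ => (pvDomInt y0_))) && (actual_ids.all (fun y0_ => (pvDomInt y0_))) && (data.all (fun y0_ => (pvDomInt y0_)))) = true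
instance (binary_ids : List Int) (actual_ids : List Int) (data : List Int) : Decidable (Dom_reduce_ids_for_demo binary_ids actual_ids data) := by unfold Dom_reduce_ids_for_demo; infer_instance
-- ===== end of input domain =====

-- B replaces A's rewinding pop-in-place while loop by a plan-then-execute scheme
-- (objective: alternative). Both A and B mutate the argument lists in place; the
-- equivalence proved here is about the RETURN value.

-- ===== PORT A =====
-- the while loop of A: state = the three (mutated) lists plus i, length, j, target
def pvLoopA (binary_ids actual_ids data : List Int) (i length j target : Int) :
    List Int × List Int × List Int :=
  if h : i < length ∧ target < j then
    if (PySem.List.pyGet? binary_ids i).getD (-1) = 0 then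
      let data' := ((PySem.List.pop? data i).map Prod.snd).getD data
      let actual' := ((PySem.List.pop? actual_ids i).map Prod.snd).getD actual_ids
      let binary' := ((PySem.List.pop? binary_ids i).map Prod.snd).getD binary_ids
      -- i = i - 1; length = length - 1; j = j - 1; i = i + 1
      pvLoopA binary' actual' data' i (length - 1) (j - 1) target
    else
      pvLoopA binary_ids actual_ids data (i + 1) length j target
  else (binary_ids, actual_ids, data)
termination_by (length - i).toNat
decreasing_by all_goals omega

def reduce_ids_for_demo (binary_ids : List Int) (actual_ids : List Int) (data : List Int) : List Int × List Int × List Int :=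
  pvLoopA binary_ids actual_ids data 0 binary_ids.length
    (binary_ids.length - binary_ids.sum) binary_ids.sum

-- ===== PORT B =====
-- planning pass: for j, b in enumerate(binary_ids): record j while budget k lasts
def pvPlan (bs : List (Int × Nat)) (k : Int) (drops : List Nat) : Int × List Nat :=
  match bs with
  | [] => (k, drops)
  | (b, j) :: t =>
    if k > 0 ∧ b = 0 then pvPlan t (k - 1) (drops ++ [j])
    else pvPlan t k drops

-- execution pass: for j in reversed(drops): pop j from data, actual_ids, binary_ids
def pvPop3 (st : List Int × List Int × List Int) (j : Nat) :
    List Int × List Int × List Int :=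
  let d' := ((PySem.List.pop? st.2.2 (j : Int)).map Prod.snd).getD st.2.2
  let a' := ((PySem.List.pop? st.2.1 (j : Int)).map Prod.snd).getD st.2.1
  let b' := ((PySem.List.pop? st.1 (j : Int)).map Prod.snd).getD st.1
  (b', a', d')

def reduce_ids_for_demo_alt (binary_ids : List Int) (actual_ids : List Int) (data : List Int) : List Int × List Int × List Int :=
  let k := (binary_ids.length : Int) - 2 * binary_ids.sum
  let drops := (pvPlan binary_ids.zipIdx k []).2
  drops.reverse.foldl pvPop3 (binary_ids, actual_ids, data)

-- ===== PRECONDITION & SPEC =====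
-- the positions of the zero entries of bs, in order
def pvZeroPos (bs : List Int) : List Nat :=
  (bs.zipIdx.filter (fun p => p.1 == 0)).map Prod.snd

-- Pre_: each of the first (zeros - ones) zero positions of binary_ids is a valid index
-- into both actual_ids and data; this is exactly where A returns (otherwise a pop
-- goes out of range and A raises IndexError — and so does B).
def Pre_reduce_ids_for_demo (binary_ids : List Int) (actual_ids : List Int) (data : List Int) : Prop :=
  ∀ q ∈ (pvZeroPos binary_ids).take
      (((binary_ids.length : Int) - 2 * binary_ids.sum).toNat),
    q < actual_ids.length ∧ q < data.length
instance (binary_ids : List Int) (actual_ids : List Int) (data : List Int) : Decidable (Pre_reduce_ids_for_demo binary_ids actual_ids data) := by unfold Pre_reduce_ids_for_demo; infer_instance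

def pvWitness_reduce_ids_for_demo : List Int × List Int × List Int :=
  ([0, 0, 1], [10, 20, 30], [5, 6, 7])

def Spec_reduce_ids_for_demo (binary_ids : List Int) (actual_ids : List Int) (data : List Int) (out : List Int × List Int × List Int) : Prop := out = reduce_ids_for_demo_alt binary_ids actual_ids data
instance (binary_ids : List Int) (actual_ids : List Int) (data : List Int) (out : List Int × List Int × List Int) : Decidable (Spec_reduce_ids_for_demo binary_ids actual_ids data out) := by unfold Spec_reduce_ids_for_demo; infer_instance

-- ===== CLAIM (what is proved, stated in full; the proofs are below) =====
def Claim_equal_reduce_ids_for_demo : Prop := ∀ (binary_ids : List Int) (actual_ids : List Int) (data : List Int), Dom_reduce_ids_for_demo binary_ids actual_ids data → Pre_reduce_ids_for_demo binary_ids actual_ids data → Spec_reduce_ids_for_demo binary_ids actual_ids data (reduce_ids_for_demo binary_ids actual_ids data)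

-- ===== LEMMAS AND PROOFS =====

-- proof-layer recursion: the removal expressed on the three suffixes directly
def pvG (k : Int) : List Int → List Int → List Int → List Int × List Int × List Int
  | [], ta, td => ([], ta, td)
  | b :: t, ta, td =>
    if k > 0 ∧ b = 0 then pvG (k - 1) t (ta.drop 1) (td.drop 1)
    else
      let r := pvG k t (ta.drop 1) (td.drop 1)
      (b :: r.1, ta.take 1 ++ r.2.1, td.take 1 ++ r.2.2)

-- removing a sorted list of positions, back to front
def pvEraseMany (l : List Int) (ds : List Nat) : List Int :=
  ds.foldr (fun j acc => acc.eraseIdx j) l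

-- expanding pvZeroPos-style expressions over a cons, at any start offset
lemma pvZpAux_cons (b : Int) (bs : List Int) (n : Nat) :
    (((b :: bs).zipIdx n).filter (fun p => p.1 == 0)).map Prod.snd
      = (if b = 0 then [n] else [])
        ++ ((bs.zipIdx (n + 1)).filter (fun p => p.1 == 0)).map Prod.snd := by
  by_cases hb : b = 0 <;> simp [List.zipIdx_cons, hb]

-- zipIdx offset shift for pvZeroPos-style expressions
lemma pvZp_shift (bs : List Int) : ∀ (n : Nat),
    ((bs.zipIdx n).filter (fun p => p.1 == 0)).map Prod.snd
      = (((bs.zipIdx 0).filter (fun p => p.1 == 0)).map Prod.snd).map (· + n) := by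
  induction bs with
  | nil => intro n; simp
  | cons b bs ih =>
    intro n
    rw [pvZpAux_cons b bs n, pvZpAux_cons b bs 0, ih (n + 1), ih 1]
    rw [List.map_append, List.map_map, List.map_map]
    by_cases hb : b = 0 <;>
      simp only [hb, if_true, if_false, List.map_cons, List.map_nil, Nat.zero_add,
        List.map_map] <;>
    · congr 1
      apply List.map_congr_left
      intro x _
      simp [Function.comp]
      omega

lemma pvZp_cons (b : Int) (bs : List Int) :
    pvZeroPos (b :: bs)
      = (if b = 0 then [0] else []) ++ (pvZeroPos bs).map (· + 1) := by
  unfold pvZeroPos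
  rw [pvZpAux_cons b bs 0, pvZp_shift bs 1]

-- pvG with exhausted budget keeps everything
lemma pvG_nonpos (k : Int) (hk : ¬ k > 0) : ∀ (t ta td : List Int),
    pvG k t ta td = (t, ta, td) := by
  intro t
  induction t with
  | nil => intro ta td; simp [pvG]
  | cons b t ih =>
    intro ta td
    simp only [pvG, hk, false_and, if_false, ih]
    cases ta <;> cases td <;> simp

-- no further zero position within budget ⇒ pvG keeps everything
lemma pvG_of_take_nil (t : List Int) : ∀ (k : Int) (ta td : List Int),
    (pvZeroPos t).take k.toNat = [] → pvG k t ta td = (t, ta, td) := by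
  induction t with
  | nil => intro k ta td _; simp [pvG]
  | cons b t ih =>
    intro k ta td hnil
    by_cases hk : k > 0
    · have hb : b ≠ 0 := by
        intro hb
        rw [pvZp_cons, hb, if_pos rfl] at hnil
        simp only [List.singleton_append] at hnil
        have h0 : k.toNat ≠ 0 := by omega
        cases hkn : k.toNat with
        | zero => exact h0 hkn
        | succ m => rw [hkn] at hnil; simp [List.take_succ_cons] at hnil
      have ht : (pvZeroPos t).take k.toNat = [] := by
        rw [pvZp_cons, if_neg hb, List.nil_append] at hnil
        rcases List.take_eq_nil_iff.mp hnil with h | h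
        · simp [h]
        · rcases List.map_eq_nil_iff.mp h with h0
          simp [h0]
      simp only [pvG, hk, hb, and_false, if_false, ih k _ _ ht]
      cases ta <;> cases td <;> simp
    · exact pvG_nonpos k hk _ ta td

-- no further zero position within budget ⇒ A's loop only walks to the end
lemma pvLoopA_of_take_nil (t : List Int) : ∀ (p A D : List Int) (k target : Int),
    (pvZeroPos t).take k.toNat = [] →
    pvLoopA (p ++ t) A D (p.length : Int) ((p ++ t).length : Int) (target + k) target
      = (p ++ t, A, D) := by
  induction t with
  | nil =>
    intro p A D k target _
    rw [pvLoopA]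
    simp
  | cons b t ih =>
    intro p A D k target hnil
    by_cases hk : k > 0
    · have hb : b ≠ 0 := by
        intro hb
        rw [pvZp_cons, hb, if_pos rfl] at hnil
        simp only [List.singleton_append] at hnil
        have h0 : k.toNat ≠ 0 := by omega
        cases hkn : k.toNat with
        | zero => exact h0 hkn
        | succ m => rw [hkn] at hnil; simp [List.take_succ_cons] at hnil
      have ht : (pvZeroPos t).take k.toNat = [] := by
        rw [pvZp_cons, if_neg hb, List.nil_append] at hnil
        rcases List.take_eq_nil_iff.mp hnil with h | h
        · simp [h]
        · simp [List.map_eq_nil_iff.mp h]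
      rw [pvLoopA]
      have hcond : (p.length : Int) < ((p ++ b :: t).length : Int) ∧ target < target + k := by
        simp [List.length_append]; omega
      rw [dif_pos hcond]
      have hget : PySem.List.pyGet? (p ++ b :: t) (p.length : Int) = some b :=
        PySem.List.pyGet?_append_length ..
      rw [hget]
      simp only [Option.getD_some]
      rw [if_neg hb]
      have hre : p ++ b :: t = (p ++ [b]) ++ t := by simp
      have hlen2 : ((p ++ [b]).length : Int) = (p.length : Int) + 1 := by simp
      rw [hre, ← hlen2, ih (p ++ [b]) A D k target ht]
    · rw [pvLoopA]
      have : ¬ ((p.length : Int) < ((p ++ b :: t).length : Int) ∧ target < target + k) := by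
        intro h; omega
      rw [dif_neg this]

-- removing the element at index |q| of q ++ x :: s yields q ++ s
lemma pvEraseMid : ∀ (q : List Int) (x : Int) (s : List Int),
    (q ++ x :: s).eraseIdx q.length = q ++ s := by
  intro q
  induction q with
  | nil => intro x s; simp
  | cons y q ih => intro x s; simp [ih]

-- main invariant: A's loop at index i = |p| (prefixes p/pa/pd of equal length already
-- kept) computes prefix ++ pvG on the suffixes, provided every zero position removed
-- from the suffix t is a valid index into the suffixes ta/td
lemma pvLoopA_eq (t : List Int) : ∀ (ta td p pa pd : List Int) (k target : Int),
    pa.length = p.length → pd.length = p.length →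
    (∀ q ∈ (pvZeroPos t).take k.toNat, q < ta.length ∧ q < td.length) →
    pvLoopA (p ++ t) (pa ++ ta) (pd ++ td) (p.length : Int) ((p ++ t).length : Int)
        (target + k) target
      = (p ++ (pvG k t ta td).1,
         pa ++ (pvG k t ta td).2.1,
         pd ++ (pvG k t ta td).2.2) := by
  induction t with
  | nil =>
    intro ta td p pa pd k target h1 h2 _
    rw [pvLoopA]
    simp [pvG]
  | cons b t ih =>
    intro ta td p pa pd k target h1 h2 H
    by_cases hk : k > 0
    · by_cases hb : b = 0
      · subst hb
        have hzp : (pvZeroPos ((0:Int) :: t)).take k.toNat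
            = 0 :: ((pvZeroPos t).map (· + 1)).take (k.toNat - 1) := by
          rw [pvZp_cons, if_pos rfl]
          cases hkn : k.toNat with
          | zero => omega
          | succ m => simp [List.take_succ_cons]
        have h0 : (0:Nat) < ta.length ∧ (0:Nat) < td.length := by
          apply H; rw [hzp]; exact List.mem_cons_self ..
        match ta, td with
        | a :: ta', d :: td' =>
          rw [pvLoopA]
          have hcond : (p.length : Int) < ((p ++ (0:Int) :: t).length : Int)
              ∧ target < target + k := by
            simp [List.length_append]; omega
          rw [dif_pos hcond]
          have hget : PySem.List.pyGet? (p ++ (0:Int) :: t) (p.length : Int) = some 0 :=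
            PySem.List.pyGet?_append_length ..
          rw [hget]
          simp only [Option.getD_some, if_true]
          have hpop : ∀ (q : List Int) (s : List Int) (x : Int), q.length = p.length →
              ((PySem.List.pop? (q ++ x :: s) (p.length : Int)).map Prod.snd).getD (q ++ x :: s)
                = q ++ s := by
            intro q s x hq
            have hlt : p.length < (q ++ x :: s).length := by simp; omega
            rw [PySem.List.pop?_natCast _ _ hlt]
            simp [← hq, pvEraseMid]
          rw [hpop p t 0 rfl, hpop pa ta' a h1, hpop pd td' d h2]
          have hlen : ((p ++ (0:Int) :: t).length : Int) - 1 = ((p ++ t).length : Int) := by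
            simp [List.length_append]; omega
          have hj : target + k - 1 = target + (k - 1) := by omega
          have H' : ∀ q ∈ (pvZeroPos t).take (k - 1).toNat,
              q < ta'.length ∧ q < td'.length := by
            intro q hq
            have hq1 : q + 1 ∈ ((pvZeroPos t).map (· + 1)).take (k.toNat - 1) := by
              rw [← List.map_take]
              have : (k - 1).toNat = k.toNat - 1 := by omega
              rw [this] at hq
              exact List.mem_map_of_mem hq
            have := H (q + 1) (by rw [hzp]; exact List.mem_cons_of_mem _ hq1)
            simp only [List.length_cons] at this
            omega
          rw [hlen, hj, ih ta' td' p pa pd (k - 1) target h1 h2 H']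
          have : pvG k ((0:Int) :: t) (a :: ta') (d :: td')
              = pvG (k - 1) t ta' td' := by
            simp [pvG, hk]
          rw [this]
      · have hzp : (pvZeroPos (b :: t)).take k.toNat
            = ((pvZeroPos t).map (· + 1)).take k.toNat := by
          rw [pvZp_cons, if_neg hb, List.nil_append]
        have hGcons : pvG k (b :: t) ta td
            = (b :: (pvG k t (ta.drop 1) (td.drop 1)).1,
               ta.take 1 ++ (pvG k t (ta.drop 1) (td.drop 1)).2.1,
               td.take 1 ++ (pvG k t (ta.drop 1) (td.drop 1)).2.2) := by
          simp [pvG, hb]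
        rw [pvLoopA]
        have hcond : (p.length : Int) < ((p ++ b :: t).length : Int)
            ∧ target < target + k := by
          simp [List.length_append]; omega
        rw [dif_pos hcond]
        have hget : PySem.List.pyGet? (p ++ b :: t) (p.length : Int) = some b :=
          PySem.List.pyGet?_append_length ..
        rw [hget]
        simp only [Option.getD_some]
        rw [if_neg hb]
        by_cases hnil : (pvZeroPos t).take k.toNat = []
        · have hre : p ++ b :: t = (p ++ [b]) ++ t := by simp
          have hlen2 : ((p ++ [b]).length : Int) = (p.length : Int) + 1 := by simp
          rw [hre, ← hlen2, pvLoopA_of_take_nil t (p ++ [b]) (pa ++ ta) (pd ++ td) k target hnil]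
          rw [hGcons, pvG_of_take_nil t k (ta.drop 1) (td.drop 1) hnil]
          cases ta <;> cases td <;> simp
        · obtain ⟨q, hq⟩ := List.exists_mem_of_ne_nil _ hnil
          have hq1 : q + 1 ∈ (pvZeroPos (b :: t)).take k.toNat := by
            rw [hzp, ← List.map_take]
            exact List.mem_map_of_mem hq
          have hqlt := H (q + 1) hq1
          match ta, td with
          | a :: ta', d :: td' =>
            have H' : ∀ q ∈ (pvZeroPos t).take k.toNat,
                q < ta'.length ∧ q < td'.length := by
              intro q' hq'
              have : q' + 1 ∈ (pvZeroPos (b :: t)).take k.toNat := by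
                rw [hzp, ← List.map_take]
                exact List.mem_map_of_mem hq'
              have := H (q' + 1) this
              simp only [List.length_cons] at this
              omega
            have hre : p ++ b :: t = (p ++ [b]) ++ t := by simp
            have hre2 : pa ++ a :: ta' = (pa ++ [a]) ++ ta' := by simp
            have hre3 : pd ++ d :: td' = (pd ++ [d]) ++ td' := by simp
            have hlen2 : ((p ++ [b]).length : Int) = (p.length : Int) + 1 := by simp
            rw [hre, hre2, hre3, ← hlen2,
              ih ta' td' (p ++ [b]) (pa ++ [a]) (pd ++ [d]) k target
                (by simp [h1]) (by simp [h2]) H']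
            rw [hGcons]
            simp
    · rw [pvLoopA]
      have : ¬ ((p.length : Int) < ((p ++ b :: t).length : Int) ∧ target < target + k) := by
        intro h; omega
      rw [dif_neg this]
      rw [pvG_nonpos k hk (b :: t) ta td]

-- B-side lemmas ------------------------------------------------------------

-- the planning pass collects exactly the first k zero positions, shifted by the offset
lemma pvPlan_eq (bs : List Int) : ∀ (n : Nat) (k : Int) (acc : List Nat),
    (pvPlan (bs.zipIdx n) k acc).2
      = acc ++ (((pvZeroPos bs).take k.toNat).map (· + n)) := by
  induction bs with
  | nil => intro n k acc; simp [pvPlan, pvZeroPos]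
  | cons b bs ih =>
    intro n k acc
    rw [List.zipIdx_cons]
    by_cases hc : k > 0 ∧ b = 0
    · obtain ⟨hk, hb⟩ := hc
      subst hb
      have hstep : pvPlan (((0:Int), n) :: bs.zipIdx (n + 1)) k acc
          = pvPlan (bs.zipIdx (n + 1)) (k - 1) (acc ++ [n]) := by
        simp [pvPlan, hk]
      rw [hstep, ih (n + 1) (k - 1) (acc ++ [n])]
      rw [pvZp_cons, if_pos rfl, List.singleton_append]
      obtain ⟨m, hm⟩ : ∃ m, k.toNat = m + 1 := ⟨k.toNat - 1, by omega⟩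
      rw [hm, List.take_succ_cons, List.map_cons, ← List.map_take, List.map_map]
      have h1 : (k - 1).toNat = m := by omega
      rw [h1, List.append_assoc, List.singleton_append]
      congr 2
      · omega
      apply List.map_congr_left
      intro x _
      simp [Function.comp]
      omega
    · have hstep : pvPlan ((b, n) :: bs.zipIdx (n + 1)) k acc
          = pvPlan (bs.zipIdx (n + 1)) k acc := by
        simp [pvPlan, hc]
      rw [hstep, ih (n + 1) k acc]
      by_cases hk : k > 0
      · have hb : b ≠ 0 := by tauto
        rw [pvZp_cons, if_neg hb, List.nil_append, ← List.map_take, List.map_map]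
        congr 1
        apply List.map_congr_left
        intro x _
        simp [Function.comp]
        omega
      · have h0 : k.toNat = 0 := by omega
        simp [h0]

-- pop-with-default is eraseIdx, in and out of range
lemma pvPopGetD (l : List Int) (j : Nat) :
    ((PySem.List.pop? l (j : Int)).map Prod.snd).getD l = l.eraseIdx j := by
  by_cases h : j < l.length
  · rw [PySem.List.pop?_natCast _ _ h]; simp
  · have h1 : PySem.List.pop? l (j : Int) = none := by
      simp [PySem.List.pop?, PySem.List.pyIdx?]
      omega
    rw [h1]
    simp only [Option.map_none, Option.getD_none]
    rw [List.eraseIdx_of_length_le (by omega)]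

-- the execution pass removes the planned positions from each list independently
lemma pvExec_eq (ds : List Nat) : ∀ (b a d : List Int),
    ds.reverse.foldl pvPop3 (b, a, d)
      = (pvEraseMany b ds, pvEraseMany a ds, pvEraseMany d ds) := by
  induction ds with
  | nil => intro b a d; simp [pvEraseMany]
  | cons j ds ih =>
    intro b a d
    rw [List.reverse_cons, List.foldl_append, ih b a d]
    simp only [List.foldl_cons, List.foldl_nil, pvPop3, pvPopGetD, pvEraseMany,
      List.foldr_cons]

lemma pvEraseMany_nil (ds : List Nat) : pvEraseMany [] ds = [] := by
  induction ds with
  | nil => rfl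
  | cons j ds ih =>
    show (pvEraseMany [] ds).eraseIdx j = []
    rw [ih]
    rfl

lemma pvEraseMany_cons_map (x : Int) (l : List Int) (ds : List Nat) :
    pvEraseMany (x :: l) (ds.map (· + 1)) = x :: pvEraseMany l ds := by
  induction ds with
  | nil => rfl
  | cons j ds ih =>
    show (pvEraseMany (x :: l) (ds.map (· + 1))).eraseIdx (j + 1)
      = x :: (pvEraseMany l ds).eraseIdx j
    rw [ih]
    rfl

lemma pvEraseMany_zero_cons (x : Int) (l : List Int) (ds : List Nat) :
    pvEraseMany (x :: l) (0 :: ds.map (· + 1)) = pvEraseMany l ds := by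
  show (pvEraseMany (x :: l) (ds.map (· + 1))).eraseIdx 0 = pvEraseMany l ds
  rw [pvEraseMany_cons_map]
  rfl

lemma pvEraseMany_generic (l : List Int) (ds : List Nat) :
    l.take 1 ++ pvEraseMany (l.drop 1) ds = pvEraseMany l (ds.map (· + 1)) := by
  cases l with
  | nil => simp [pvEraseMany_nil]
  | cons x l =>
    simp only [List.take_succ_cons, List.take_zero, List.drop_succ_cons, List.drop_zero,
      List.singleton_append, pvEraseMany_cons_map]

-- pvG computes exactly the removal of the first-k-zero positions from all three lists
lemma pvG_eq_eraseMany (t : List Int) : ∀ (k : Int) (ta td : List Int),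
    (∀ q ∈ (pvZeroPos t).take k.toNat, q < ta.length ∧ q < td.length) →
    pvG k t ta td
      = (pvEraseMany t ((pvZeroPos t).take k.toNat),
         pvEraseMany ta ((pvZeroPos t).take k.toNat),
         pvEraseMany td ((pvZeroPos t).take k.toNat)) := by
  induction t with
  | nil => intro k ta td _; simp [pvG, pvZeroPos, pvEraseMany]
  | cons b t ih =>
    intro k ta td H
    by_cases hk : k > 0
    · by_cases hb : b = 0
      · subst hb
        have hzp : (pvZeroPos ((0:Int) :: t)).take k.toNat
            = 0 :: ((pvZeroPos t).take (k - 1).toNat).map (· + 1) := by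
          rw [pvZp_cons, if_pos rfl, List.singleton_append]
          obtain ⟨m, hm⟩ : ∃ m, k.toNat = m + 1 := ⟨k.toNat - 1, by omega⟩
          rw [hm, List.take_succ_cons, ← List.map_take]
          have h1 : (k - 1).toNat = m := by omega
          rw [h1]
        have h0 : (0:Nat) < ta.length ∧ (0:Nat) < td.length := by
          apply H; rw [hzp]; exact List.mem_cons_self ..
        match ta, td with
        | a :: ta', d :: td' =>
          have H' : ∀ q ∈ (pvZeroPos t).take (k - 1).toNat,
              q < ta'.length ∧ q < td'.length := by
            intro q hq
            have := H (q + 1)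
              (by rw [hzp]; exact List.mem_cons_of_mem _ (List.mem_map_of_mem hq))
            simp only [List.length_cons] at this
            omega
          have hG : pvG k ((0:Int) :: t) (a :: ta') (d :: td')
              = pvG (k - 1) t ta' td' := by simp [pvG, hk]
          rw [hG, ih (k - 1) ta' td' H', hzp]
          rw [pvEraseMany_zero_cons, pvEraseMany_zero_cons, pvEraseMany_zero_cons]
      · have hzp : (pvZeroPos (b :: t)).take k.toNat
            = ((pvZeroPos t).take k.toNat).map (· + 1) := by
          rw [pvZp_cons, if_neg hb, List.nil_append, List.map_take]
        have hG : pvG k (b :: t) ta td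
            = (b :: (pvG k t (ta.drop 1) (td.drop 1)).1,
               ta.take 1 ++ (pvG k t (ta.drop 1) (td.drop 1)).2.1,
               td.take 1 ++ (pvG k t (ta.drop 1) (td.drop 1)).2.2) := by
          simp [pvG, hb]
        have H' : ∀ q ∈ (pvZeroPos t).take k.toNat,
            q < (ta.drop 1).length ∧ q < (td.drop 1).length := by
          intro q hq
          have := H (q + 1) (by rw [hzp]; exact List.mem_map_of_mem hq)
          simp only [List.length_drop]
          omega
        rw [hG, ih k (ta.drop 1) (td.drop 1) H', hzp]
        rw [pvEraseMany_generic ta, pvEraseMany_generic td, ← pvEraseMany_cons_map]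
    · have hkn : k.toNat = 0 := by omega
      rw [pvG_nonpos k hk]
      simp [hkn, pvEraseMany]

-- ===== VERDICT (by name: the statement is the Claim_ definition above) =====
theorem reduce_ids_for_demo_spec : Claim_equal_reduce_ids_for_demo := by
  intro b a d _ hpre
  unfold Spec_reduce_ids_for_demo reduce_ids_for_demo reduce_ids_for_demo_alt
  unfold Pre_reduce_ids_for_demo at hpre
  have hA := pvLoopA_eq b a d [] [] [] ((b.length : Int) - 2 * b.sum) b.sum rfl rfl hpre
  simp only [List.nil_append, List.length_nil, Nat.cast_zero] at hA
  have hj : b.sum + ((b.length : Int) - 2 * b.sum) = (b.length : Int) - b.sum := by ring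
  rw [hj] at hA
  rw [hA]
  have hplan := pvPlan_eq b 0 ((b.length : Int) - 2 * b.sum) []
  simp only [List.nil_append] at hplan
  have hmap0 : (((pvZeroPos b).take ((b.length : Int) - 2 * b.sum).toNat).map (· + 0))
      = (pvZeroPos b).take ((b.length : Int) - 2 * b.sum).toNat := by
    simp
  rw [hmap0] at hplan
  show _ = ((pvPlan b.zipIdx ((b.length : Int) - 2 * b.sum) []).2).reverse.foldl
      pvPop3 (b, a, d)
  rw [hplan, pvExec_eq, pvG_eq_eraseMany b _ a d hpre]
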